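-- pv_equiv track=rewrite | github.com/danielv27/AST-Insight | utils/format.py | adjust_code_formatting
-- ===== SOURCE A (Python) =====
-- def adjust_code_formatting(code: str):
--     lines = code.splitlines()
--     adjusted_lines = []
--     add_empty_line_next = False
--
--     for i, line in enumerate(lines):
--         stripped_line = line.strip()
--
--         if stripped_line == '}':
--             adjusted_lines.append(line)
--             add_empty_line_next = True
--         else:
--             if add_empty_line_next:
--                 adjusted_lines.append('')  # Ensure exactly one empty line
--                 add_empty_line_next = False
--             if stripped_line or (adjusted_lines and adjusted_lines[-1] != ''):
--                 adjusted_lines.append(line)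
--
--     return '\n'.join(adjusted_lines)
-- ===== SOURCE B (Python) =====
-- def adjust_code_formatting(code: str):
--     lines = code.splitlines()
--     # Pass 1: after the last '}' of each run of closing-brace lines, insert a
--     # blank marker line, but only when another line follows the run.
--     marked = []
--     for line, nxt in zip(lines, lines[1:] + [None]):
--         marked.append(line)
--         if line.strip() == '}' and nxt is not None and nxt.strip() != '}':
--             marked.append('')
--     # Pass 2: keep a line iff it has content, or the last kept line is non-blank.
--     kept = []
--     for line in marked:
--         if line.strip() or (kept and kept[-1] != ''):
--             kept.append(line)
--     return '\n'.join(kept)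
-- ===== Notes on version B (the rewrite author's own statement) =====
-- stated objective: alternative
-- what changed: Replaced A's single fused state machine (pending-blank flag threaded through one loop) by two independent passes: a lookahead pass that inserts a blank marker after each maximal run of '}' lines that is followed by another line, then a generic collapse pass that drops a blank line when nothing non-blank was kept before it.
import Mathlib
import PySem

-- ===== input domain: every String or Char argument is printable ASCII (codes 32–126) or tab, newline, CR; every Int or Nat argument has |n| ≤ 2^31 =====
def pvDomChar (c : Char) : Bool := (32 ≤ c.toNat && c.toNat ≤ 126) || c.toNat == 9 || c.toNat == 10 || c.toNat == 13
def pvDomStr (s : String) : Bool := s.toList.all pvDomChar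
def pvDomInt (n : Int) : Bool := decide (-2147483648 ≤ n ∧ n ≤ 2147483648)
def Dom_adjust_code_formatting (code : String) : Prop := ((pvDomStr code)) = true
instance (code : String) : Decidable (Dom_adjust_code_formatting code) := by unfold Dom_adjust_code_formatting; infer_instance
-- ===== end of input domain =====

-- B replaces A's fused flag-carrying state machine by two independent passes
-- (insert blank markers after '}' runs with lookahead, then collapse blanks);
-- objective: alternative decomposition, same cost.

-- ===== PORT A =====
-- one fused loop with state (adjusted_lines, add_empty_line_next)
def pvStepA (st : List String × Bool) (line : String) : List String × Bool :=
  let stripped := PySem.Str.strip line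
  if stripped == "}" then
    (st.1 ++ [line], true)
  else
    let adjusted := if st.2 then st.1 ++ [""] else st.1
    if stripped != "" || (!adjusted.isEmpty && adjusted.getLastD "" != "") then
      (adjusted ++ [line], false)
    else
      (adjusted, false)

def adjust_code_formatting (code : String) : String :=
  let lines := PySem.Str.splitlines code
  PySem.Str.join "\n" (List.foldl pvStepA ([], false) lines).1

-- ===== PORT B =====
-- pass 1 of Source B: loop over zip(lines, lines[1:] + [None]) appending markers
def pvPass1 : List (String × Option String) → List String
  | [] => []
  | (line, nxt) :: rest =>
      if PySem.Str.strip line == "}" &&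
         (match nxt with | some n => PySem.Str.strip n != "}" | none => false) then
        line :: "" :: pvPass1 rest
      else
        line :: pvPass1 rest

-- pass 2 of Source B: keep a line iff it has content or the last kept line is non-blank
def pvStepB (kept : List String) (line : String) : List String :=
  if PySem.Str.strip line != "" || (!kept.isEmpty && kept.getLastD "" != "") then
    kept ++ [line]
  else
    kept

def adjust_code_formatting_alt (code : String) : String :=
  let lines := PySem.Str.splitlines code
  let marked := pvPass1 (lines.zip ((lines.drop 1).map some ++ [none]))
  PySem.Str.join "\n" (List.foldl pvStepB [] marked)

-- ===== PRECONDITION & SPEC =====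
def Spec_adjust_code_formatting (code : String) (out : String) : Prop := out = adjust_code_formatting_alt code
instance (code : String) (out : String) : Decidable (Spec_adjust_code_formatting code out) := by unfold Spec_adjust_code_formatting; infer_instance

-- ===== CLAIM (what is proved, stated in full; the proofs are below) =====
def Claim_equal_adjust_code_formatting : Prop := ∀ (code : String), Dom_adjust_code_formatting code → Spec_adjust_code_formatting code (adjust_code_formatting code)

-- ===== LEMMAS AND PROOFS =====

-- proof-only reformulation of the marker pass as a forward recursion with a flag
def pvMarkerize (flag : Bool) : List String → List String
  | [] => []
  | l :: rest =>
      if PySem.Str.strip l == "}" then l :: pvMarkerize true rest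
      else if flag then "" :: l :: pvMarkerize false rest
      else l :: pvMarkerize false rest

lemma pvMarkerize_true (rest : List String) :
    pvMarkerize true rest =
      (if (match rest.head? with | some n => PySem.Str.strip n != "}" | none => false) then
        "" :: pvMarkerize false rest else pvMarkerize false rest) := by
  cases rest with
  | nil => simp [pvMarkerize]
  | cons l rs =>
      by_cases h : PySem.Str.strip l == "}" <;>
        simp [pvMarkerize, List.head?, h] <;> simp_all

lemma pvPass1_eq_markerize (lines : List String) :
    pvPass1 (lines.zip ((lines.drop 1).map some ++ [none])) = pvMarkerize false lines := by
  induction lines with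
  | nil => simp [pvPass1, pvMarkerize]
  | cons a rest ih =>
      have hzip : (a :: rest).zip (((a :: rest).drop 1).map some ++ [none])
          = (a, rest.head?) :: rest.zip ((rest.drop 1).map some ++ [none]) := by
        cases rest <;> simp [List.zip]
      rw [hzip]
      by_cases h : PySem.Str.strip a == "}"
      · simp only [pvPass1, pvMarkerize, h, Bool.true_and, ih, pvMarkerize_true]
        by_cases hn : (match rest.head? with | some n => PySem.Str.strip n != "}" | none => false) <;>
          simp [hn]
      · simp only [pvPass1, pvMarkerize, h, Bool.false_and, if_neg, Bool.false_eq_true,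
          not_false_iff]
        rw [ih]

lemma pv_strip_brace_ne_empty {t : String} (h : PySem.Str.strip t = "}") : t ≠ "" := by
  intro he; subst he; simp [PySem.Str.strip] at h
  exact absurd h (by decide)

lemma pv_main (lines : List String) :
    ∀ (acc : List String) (flag : Bool),
      (flag = true → ∃ t, acc.getLast? = some t ∧ PySem.Str.strip t = "}") →
      (List.foldl pvStepA (acc, flag) lines).1 = List.foldl pvStepB acc (pvMarkerize flag lines) := by
  induction lines with
  | nil => intro acc flag _; simp [pvMarkerize]
  | cons l rest ih =>
      intro acc flag hinv
      by_cases h : PySem.Str.strip l == "}"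
      · have hl : PySem.Str.strip l = "}" := by simpa using h
        have hb : pvStepB acc l = acc ++ [l] := by
          simp [pvStepB, hl]
        have hstep : pvStepA (acc, flag) l = (acc ++ [l], true) := by
          simp [pvStepA, h]
        rw [show pvMarkerize flag (l :: rest) = l :: pvMarkerize true rest from by
          simp [pvMarkerize, h]]
        rw [List.foldl_cons, List.foldl_cons, hb, hstep]
        exact ih (acc ++ [l]) true (fun _ => ⟨l, by simp, hl⟩)
      · cases flag with
        | false =>
            have hstep : pvStepA (acc, false) l = (pvStepB acc l, false) := by
              simp only [pvStepA, pvStepB, h, Bool.false_eq_true, if_false]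
              split <;> rfl
            rw [show pvMarkerize false (l :: rest) = l :: pvMarkerize false rest from by
              simp [pvMarkerize, h]]
            rw [List.foldl_cons, List.foldl_cons, hstep]
            exact ih (pvStepB acc l) false (by simp)
        | true =>
            obtain ⟨t, hlast, ht⟩ := hinv rfl
            have hne : acc ≠ [] := by
              intro he; subst he; simp at hlast
            have htne : t ≠ "" := pv_strip_brace_ne_empty ht
            have hb0 : pvStepB acc "" = acc ++ [""] := by
              have h1 : PySem.Str.strip "" = "" := by decide
              have hcond : (PySem.Str.strip "" != "" || (!acc.isEmpty && acc.getLastD "" != "")) = true := by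
                simp [h1, hne, List.getLastD_eq_getLast?, hlast, htne]
              simp only [pvStepB, hcond, if_true]
            have hstep : pvStepA (acc, true) l = (pvStepB (acc ++ [""]) l, false) := by
              have hfalse : (PySem.Str.strip l == "}") = false := by simpa using h
              simp [pvStepA, pvStepB, hfalse]
              split <;> rfl
            rw [show pvMarkerize true (l :: rest) = "" :: l :: pvMarkerize false rest from by
              simp [pvMarkerize, h]]
            rw [List.foldl_cons, List.foldl_cons, List.foldl_cons, hb0, hstep]
            exact ih (pvStepB (acc ++ [""]) l) false (by simp)

-- ===== VERDICT (by name: the statement is the Claim_ definition above) =====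
theorem adjust_code_formatting_spec : Claim_equal_adjust_code_formatting := by
  intro code _
  unfold Spec_adjust_code_formatting
  simp only [adjust_code_formatting, adjust_code_formatting_alt]
  rw [pvPass1_eq_markerize]
  rw [pv_main (PySem.Str.splitlines code) [] false (by simp)]
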